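-- pv_equiv track=rewrite | github.com/Mira-Murs/api_anomaly_detector | app/services/risk_engine/app.py | norm_endpoint_id
-- ===== SOURCE A (Python) =====
-- def norm_endpoint_id(value: str) -> str:
--     if not value:
--         return ""
--     value = str(value).strip()
--     if not value.startswith("/"):
--         value = "/" + value
--
--     parts = []
--     for part in value.split("/"):
--         if part.startswith(":") and len(part) > 1:
--             parts.append("{" + part[1:] + "}")
--         else:
--             parts.append(part)
--
--     return "/".join(parts)
-- ===== SOURCE B (Python) =====
-- def norm_endpoint_id(value: str) -> str:
--     if not value:
--         return ""
--     s = value.strip()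
--     if not s.startswith("/"):
--         s = "/" + s
--     # single left-to-right scan: copy the string, rewriting each ':'-led
--     # segment of length > 1 into '{...}'
--     out = []
--     i, n = 0, len(s)
--     while i < n:
--         j = i
--         while j < n and s[j] != "/":
--             j += 1
--         if s[i] == ":" and j - i > 1:
--             out.append("{")
--             out.append(s[i + 1 : j])
--             out.append("}")
--         else:
--             out.append(s[i:j])
--         if j < n:
--             out.append("/")
--         i = j + 1
--     return "".join(out)
-- ===== Notes on version B (the rewrite author's own statement) =====
-- stated objective: alternative
-- what changed: Replaces A's three-stage split/per-segment-loop/join pipeline with a single recursive left-to-right scan over the characters that emits each path segment (rewriting colon-led segments of length over one into brace form) and the separating slashes as it goes.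
import Mathlib
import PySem

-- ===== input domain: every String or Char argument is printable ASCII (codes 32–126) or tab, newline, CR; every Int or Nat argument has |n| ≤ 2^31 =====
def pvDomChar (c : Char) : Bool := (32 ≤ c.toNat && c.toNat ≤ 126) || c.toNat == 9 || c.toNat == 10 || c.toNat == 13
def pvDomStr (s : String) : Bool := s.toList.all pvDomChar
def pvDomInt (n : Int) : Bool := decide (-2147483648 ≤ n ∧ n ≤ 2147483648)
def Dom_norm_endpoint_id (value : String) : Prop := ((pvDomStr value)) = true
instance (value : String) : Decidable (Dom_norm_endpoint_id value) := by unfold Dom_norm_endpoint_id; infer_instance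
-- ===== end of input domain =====

-- B is an alternative: one recursive scan over the characters instead of split / per-segment loop / join.

-- ===== PORT A =====
-- split on '/', rewrite each ':'-led segment of length > 1, join back
def norm_endpoint_id (value : String) : String :=
  if value = "" then ""
  else
    let v := PySem.Chars.strip value.toList
    let v := if PySem.Chars.startswith v ['/'] then v else '/' :: v
    let parts := (PySem.Chars.splitOn v ['/']).map (fun part =>
      if PySem.Chars.startswith part [':'] && decide (1 < part.length)
      then '{' :: (part.drop 1 ++ ['}'])
      else part)
    String.ofList (PySem.Chars.join ['/'] parts)

-- ===== PORT B =====
-- rewrite of one segment (Source B's `if s[i] == ":" and j - i > 1` branch)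
def pvSegB (seg : List Char) : List Char :=
  match seg with
  | c :: d :: r => if c = ':' then '{' :: ((d :: r) ++ ['}']) else c :: d :: r
  | _ => seg

-- Source B's while-loop: scan the current suffix, emit one segment, step past the '/'
def pvScanB (cs : List Char) : List Char :=
  let seg := cs.takeWhile (· ≠ '/')
  match h : cs.dropWhile (· ≠ '/') with
  | [] => pvSegB seg
  | _ :: r => pvSegB seg ++ '/' :: pvScanB r
termination_by cs.length
decreasing_by
  have h1 := List.length_dropWhile_le (· ≠ '/') cs
  rw [h] at h1
  simp at h1
  omega

def norm_endpoint_id_alt (value : String) : String :=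
  if value = "" then ""
  else
    let v := PySem.Chars.strip value.toList
    let v := if PySem.Chars.startswith v ['/'] then v else '/' :: v
    String.ofList (pvScanB v)

-- ===== PRECONDITION & SPEC =====
def Spec_norm_endpoint_id (value : String) (out : String) : Prop := out = norm_endpoint_id_alt value
instance (value : String) (out : String) : Decidable (Spec_norm_endpoint_id value out) := by unfold Spec_norm_endpoint_id; infer_instance

-- ===== CLAIM =====
def Claim_equal_norm_endpoint_id : Prop := ∀ (value : String), Dom_norm_endpoint_id value → Spec_norm_endpoint_id value (norm_endpoint_id value)

-- ===== LEMMAS AND PROOFS =====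

-- A's split on '/', characterised structurally
def pvSplit : List Char → List (List Char)
  | [] => [[]]
  | c :: r =>
    if c = '/' then [] :: pvSplit r
    else match pvSplit r with
      | [] => [[c]]
      | h :: t => (c :: h) :: t

lemma pvSplit_ne_nil (cs : List Char) : pvSplit cs ≠ [] := by
  cases cs with
  | nil => simp [pvSplit]
  | cons c r =>
    simp only [pvSplit]
    split_ifs
    · simp
    · cases h : pvSplit r <;> simp

lemma pv_go_spec (fuel : Nat) : ∀ (l cur : List Char) (acc : List (List Char)),
    l.length ≤ fuel →
    PySem.Chars.splitOn.go ['/'] fuel l cur acc =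
      acc.reverse ++ (match pvSplit l with
        | [] => []
        | h :: t => (cur.reverse ++ h) :: t) := by
  
  induction fuel with
  | zero =>
    intro l cur acc hl
    have hln : l = [] := List.eq_nil_of_length_eq_zero (Nat.le_zero.mp hl)
    subst hln
    simp [PySem.Chars.splitOn.go, pvSplit]
  | succ n ih =>
    intro l cur acc hl
    cases l with
    | nil => simp [PySem.Chars.splitOn.go, pvSplit]
    | cons c rest =>
      by_cases hc : c = '/'
      · subst hc
        have hstep : PySem.Chars.splitOn.go ['/'] (n+1) ('/' :: rest) cur acc =
            PySem.Chars.splitOn.go ['/'] n rest [] (cur.reverse :: acc) := by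
          simp [PySem.Chars.splitOn.go, List.isPrefixOf]
        rw [hstep, ih _ _ _ (by simp at hl; omega)]
        obtain ⟨h, t, hht⟩ : ∃ h t, pvSplit rest = h :: t := by
          cases hr : pvSplit rest with
          | nil => exact absurd hr (pvSplit_ne_nil rest)
          | cons a b => exact ⟨a, b, rfl⟩
        simp [pvSplit, hht]
      · have hstep : PySem.Chars.splitOn.go ['/'] (n+1) (c :: rest) cur acc =
            PySem.Chars.splitOn.go ['/'] n rest (c :: cur) acc := by
          simp [PySem.Chars.splitOn.go, List.isPrefixOf]
          intro h
          exact absurd h.symm hc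
        rw [hstep, ih _ _ _ (by simp at hl; omega)]
        obtain ⟨h, t, hht⟩ : ∃ h t, pvSplit rest = h :: t := by
          cases hr : pvSplit rest with
          | nil => exact absurd hr (pvSplit_ne_nil rest)
          | cons a b => exact ⟨a, b, rfl⟩
        simp [pvSplit, hht, hc]

lemma pv_splitOn_eq (cs : List Char) : PySem.Chars.splitOn cs ['/'] = pvSplit cs := by
  
  unfold PySem.Chars.splitOn
  rw [pv_go_spec _ _ _ _ (by omega)]
  obtain ⟨h, t, hht⟩ : ∃ h t, pvSplit cs = h :: t := by
    cases hr : pvSplit cs with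
    | nil => exact absurd hr (pvSplit_ne_nil cs)
    | cons a b => exact ⟨a, b, rfl⟩
  simp [hht]

lemma pvSplit_structure (cs : List Char) :
    pvSplit cs = cs.takeWhile (· ≠ '/') ::
      (match cs.dropWhile (· ≠ '/') with
        | [] => ([] : List (List Char))
        | _ :: r => pvSplit r) := by
  
  induction cs with
  | nil => simp [pvSplit]
  | cons c r ih =>
    by_cases hc : c = '/'
    · subst hc
      simp [pvSplit]
    · simp only [pvSplit, List.takeWhile_cons, List.dropWhile_cons, hc, if_false,
        decide_not]
      rw [ih]
      simp

lemma pvSeg_eq (seg : List Char) :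
    (if PySem.Chars.startswith seg [':'] && decide (1 < seg.length)
     then '{' :: (seg.drop 1 ++ ['}'])
     else seg) = pvSegB seg := by
  
  cases seg with
  | nil => simp [pvSegB, PySem.Chars.startswith]
  | cons c r =>
    cases r with
    | nil =>
      by_cases hc : c = ':' <;>
        simp [pvSegB, PySem.Chars.startswith, List.isPrefixOf, hc]
    | cons d r2 =>
      by_cases hc : c = ':'
      · subst hc
        simp [pvSegB, PySem.Chars.startswith, List.isPrefixOf]
      · simp [pvSegB, PySem.Chars.startswith, List.isPrefixOf, hc]
        exact fun h => hc h.symm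

lemma pvScan_eq (cs : List Char) :
    pvScanB cs = PySem.Chars.join ['/'] ((pvSplit cs).map pvSegB) := by
  induction cs using pvScanB.induct with
  | case1 cs h =>
    rw [pvScanB, pvSplit_structure]
    split
    · rw [h]
      simp [PySem.Chars.join_singleton]
    · next hd2 r2 heq => rw [h] at heq; cases heq
  | case2 cs hd r h ih =>
    rw [pvScanB, pvSplit_structure]
    split
    · next heq => rw [h] at heq; cases heq
    · next hd2 r2 heq =>
      rw [h] at heq
      injection heq with h1 h2
      subst h1; subst h2
      simp only [h]
      obtain ⟨h2, t2, hht⟩ : ∃ h2 t2, pvSplit r = h2 :: t2 := by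
        cases hr : pvSplit r with
        | nil => exact absurd hr (pvSplit_ne_nil r)
        | cons a b => exact ⟨a, b, rfl⟩
      rw [ih]
      simp [hht, PySem.Chars.join_cons_cons]

-- ===== VERDICT =====
theorem norm_endpoint_id_spec : Claim_equal_norm_endpoint_id := by
  intro value _
  unfold Spec_norm_endpoint_id norm_endpoint_id norm_endpoint_id_alt
  by_cases hv : value = ""
  · simp [hv]
  · simp only [hv, if_false]
    rw [pv_splitOn_eq, pvScan_eq]
    congr 1
    congr 1
    apply List.map_congr_left
    intro x _
    exact pvSeg_eq x
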